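-- pv_equiv track=rewrite | github.com/umer-tahir1/Graph_Recommendation_System | Backend/app/recommender.py | build_product_graph
-- ===== SOURCE A (Python) =====
-- from collections import defaultdict, deque
-- from typing import Dict, Set, List, Tuple
--
-- def build_product_graph(product_to_users: Dict[int, Set[int]]) -> Dict[int, Set[int]]:
--     # Build product graph: connect products that share at least one user
--     prod_graph: Dict[int, Set[int]] = defaultdict(set)
--     products = list(product_to_users.keys())
--     for p in products:
--         users = product_to_users[p]
--         for u in users:
--             # for all other products that user purchased, add edge
--             for q in product_to_users:
--                 if q == p:
--                     continue
--                 if u in product_to_users[q]: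
--                     prod_graph[p].add(q)
--     return prod_graph
-- ===== SOURCE B (Python) =====
-- from collections import defaultdict
--
--
-- def build_product_graph(product_to_users):
--     # Invert once: user -> list of products (in product insertion order) that contain that user.
--     user_index = {}
--     for p, users in product_to_users.items():
--         for u in users:
--             user_index.setdefault(u, []).append(p)
--     # For each product, its neighbours are the products sharing one of its users.
--     prod_graph = defaultdict(set)
--     for p, users in product_to_users.items():
--         for u in users:
--             for q in user_index[u]:
--                 if q != p:
--                     prod_graph[p].add(q)
--     return prod_graph
-- ===== Notes on version B (the rewrite author's own statement) =====
-- stated objective: faster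
-- what changed: Instead of scanning all products for every (product, user) pair, B builds a user->products inverted index in one pass and then, for each product's users, walks only the index list of that user.
import Mathlib
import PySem

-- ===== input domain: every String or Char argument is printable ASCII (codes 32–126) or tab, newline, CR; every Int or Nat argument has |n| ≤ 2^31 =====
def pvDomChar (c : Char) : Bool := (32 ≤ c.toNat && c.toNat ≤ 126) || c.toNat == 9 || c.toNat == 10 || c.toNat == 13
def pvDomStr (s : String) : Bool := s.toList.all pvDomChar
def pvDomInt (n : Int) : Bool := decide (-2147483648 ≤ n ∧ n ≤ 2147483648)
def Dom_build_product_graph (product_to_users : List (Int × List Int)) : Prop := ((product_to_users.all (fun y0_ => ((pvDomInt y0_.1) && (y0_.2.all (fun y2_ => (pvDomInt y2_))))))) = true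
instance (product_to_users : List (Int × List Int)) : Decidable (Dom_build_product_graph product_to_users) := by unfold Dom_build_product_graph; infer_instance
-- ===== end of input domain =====

-- B builds a user->products inverted index once and, for each product's users, walks only
-- that user's product list instead of A's scan over all products per (product, user) pair.

-- ===== PORT A =====
-- literal transliteration of A: for each product p, for each of its users u,
-- scan ALL products q and add an edge p->q when u is also a user of q.
def build_product_graph (product_to_users : List (Int × List Int)) : List (Int × List Int) :=
  let d : PySem.Dict Int (List Int) := PySem.Dict.mk product_to_users
  let products := PySem.Dict.keys d
  (products.foldl (fun prod_graph p =>
      -- product_to_users[p]: p comes from keys, so the KeyError branch is unreachable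
      ((PySem.Dict.get? d p).getD []).foldl (fun prod_graph u =>
        products.foldl (fun prod_graph q =>
          if q == p then prod_graph
          else if PySem.Set.contains ((PySem.Dict.get? d q).getD []) u then
            PySem.Dict.modify prod_graph p [] (fun s => PySem.Set.add s q)
          else prod_graph) prod_graph) prod_graph)
    (PySem.Dict.empty : PySem.Dict Int (PySem.Set Int))).items

-- ===== PORT B =====
-- transliteration of Source B: invert to user_index (user -> products in insertion order),
-- then for each product walk only the products of its own users.
def build_product_graph_alt (product_to_users : List (Int × List Int)) : List (Int × List Int) :=
  let d : PySem.Dict Int (List Int) := PySem.Dict.mk product_to_users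
  let user_index : PySem.Dict Int (List Int) :=
    d.items.foldl (fun ix pu =>
      -- user_index.setdefault(u, []).append(p)  ==  ix[u] = ix.get(u, []) + [p]
      pu.2.foldl (fun ix u => PySem.Dict.modify ix u [] (fun l => l ++ [pu.1])) ix)
      PySem.Dict.empty
  (d.items.foldl (fun prod_graph pu =>
      pu.2.foldl (fun prod_graph u =>
        -- user_index[u]: u was indexed in the first pass, so KeyError is unreachable
        ((PySem.Dict.get? user_index u).getD []).foldl (fun prod_graph q =>
          if q != pu.1 then
            PySem.Dict.modify prod_graph pu.1 [] (fun s => PySem.Set.add s q)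
          else prod_graph) prod_graph) prod_graph)
    (PySem.Dict.empty : PySem.Dict Int (PySem.Set Int))).items

-- ===== PRECONDITION & SPEC =====
-- Pre_ only excludes association lists that do not denote a Python value of the declared
-- type Dict[int, Set[int]]: duplicate dict keys or duplicate elements inside a value list
-- cannot arise from a real dict of sets, so nothing is claimed about them.
def Pre_build_product_graph (product_to_users : List (Int × List Int)) : Prop :=
  (PySem.List.dedup (product_to_users.map Prod.fst) == product_to_users.map Prod.fst
    && product_to_users.all (fun e => PySem.List.dedup e.2 == e.2)) = true
instance (product_to_users : List (Int × List Int)) : Decidable (Pre_build_product_graph product_to_users) := by unfold Pre_build_product_graph; infer_instance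

def pvWitness_build_product_graph : (List (Int × List Int)) :=
  [(1, [10, 11]), (2, [11]), (3, [12])]

def Spec_build_product_graph (product_to_users : List (Int × List Int)) (out : List (Int × List Int)) : Prop := out = build_product_graph_alt product_to_users
instance (product_to_users : List (Int × List Int)) (out : List (Int × List Int)) : Decidable (Spec_build_product_graph product_to_users out) := by unfold Spec_build_product_graph; infer_instance

-- ===== CLAIM (what is proved, stated in full; the proofs are below) =====
def Claim_equal_build_product_graph : Prop := ∀ (product_to_users : List (Int × List Int)), Dom_build_product_graph product_to_users → Pre_build_product_graph product_to_users → Spec_build_product_graph product_to_users (build_product_graph product_to_users)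

-- ===== LEMMAS AND PROOFS =====

-- a nodup list filtered for one element is that element, if present
theorem pv_filter_nodup_mem (us : List Int) (a : Int) (h : us.Nodup) :
    us.filter (fun y => y == a) = if a ∈ us then [a] else [] := by
  induction us with
  | nil => simp
  | cons x t ih =>
    simp only [List.nodup_cons] at h
    by_cases hx : x = a
    · subst hx
      have : x ∉ t := h.1
      simp [ih h.2, this]
    · simp [hx, ih h.2, Ne.symm hx]

-- one product's users pass of B's index-building loop, seen through getD
theorem pv_idx_inner (us : List Int) (pp u : Int) (ix : PySem.Dict Int (List Int))
    (h : us.Nodup) :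
    (us.foldl (fun ix u' => PySem.Dict.modify ix u' [] (fun l => l ++ [pp])) ix).getD u []
      = ix.getD u [] ++ if u ∈ us then [pp] else [] := by
  have h1 : us.foldl (fun ix u' => PySem.Dict.modify ix u' [] (fun l => l ++ [pp])) ix
      = (us.map (fun u' => (u', pp))).foldl
          (fun d pr => PySem.Dict.modify d pr.1 [] (fun l => l ++ [pr.2])) ix := by
    rw [List.foldl_map]
  rw [h1, PySem.Dict.getD_foldl_modify_append]
  congr 1
  rw [List.filter_map, List.map_map]
  have h2 : List.filter ((fun p : Int × Int => p.1 == u) ∘ fun u' => (u', pp)) us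
      = us.filter (fun y => y == u) := rfl
  rw [h2, pv_filter_nodup_mem us u h]
  by_cases hm : u ∈ us <;> simp [hm]

-- B's user_index characterised: user_index[u] lists, in insertion order,
-- exactly the products whose user set contains u
theorem pv_idx_getD (L : List (Int × List Int)) (u : Int) (ix : PySem.Dict Int (List Int))
    (h : ∀ e ∈ L, e.2.Nodup) :
    (L.foldl (fun ix pu =>
        pu.2.foldl (fun ix u' => PySem.Dict.modify ix u' [] (fun l => l ++ [pu.1])) ix) ix).getD u []
      = ix.getD u [] ++ (L.filter (fun e => decide (u ∈ e.2))).map Prod.fst := by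
  induction L generalizing ix with
  | nil => simp
  | cons e t ih =>
    simp only [List.foldl_cons]
    rw [ih _ (fun e' he' => h e' (List.mem_cons_of_mem _ he')),
        pv_idx_inner _ _ _ _ (h e (List.mem_cons_self ..))]
    by_cases hm : u ∈ e.2
    · simp [hm, List.append_assoc]
    · simp [hm]

-- the two inner edge-adding loops agree: scanning all products and testing
-- membership (A) equals walking the pre-filtered index list (B)
theorem pv_inner_eq (L : List (Int × List Int)) (p u : Int)
    (g : PySem.Dict Int (PySem.Set Int))
    (hget : ∀ e ∈ L, (PySem.Dict.get? (PySem.Dict.mk L) e.1).getD ([] : List Int) = e.2) :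
    (L.map Prod.fst).foldl (fun g q =>
        if q == p then g
        else if PySem.Set.contains ((PySem.Dict.get? (PySem.Dict.mk L) q).getD []) u then
          PySem.Dict.modify g p [] (fun s => PySem.Set.add s q)
        else g) g
      = ((L.filter (fun e => decide (u ∈ e.2))).map Prod.fst).foldl (fun g q =>
          if q != p then PySem.Dict.modify g p [] (fun s => PySem.Set.add s q) else g) g := by
  rw [List.foldl_map, List.foldl_map,
      ← PySem.List.foldl_if_eq_foldl_filter (fun e => decide (u ∈ e.2))
        (fun g (e : Int × List Int) =>
          if e.1 != p then PySem.Dict.modify g p [] (fun s => PySem.Set.add s e.1) else g)]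
  apply PySem.List.foldl_congr_mem
  intro acc e he
  rw [hget e he]
  by_cases hp : e.1 = p
  · simp [hp]
  · by_cases hm : u ∈ e.2 <;> simp [hp, hm, PySem.Set.contains]

-- under nodup keys, looking a key of the dict up returns its stored list
theorem pv_hget (L : List (Int × List Int)) (hk : (L.map Prod.fst).Nodup) :
    ∀ e ∈ L, (PySem.Dict.get? (PySem.Dict.mk L) e.1).getD ([] : List Int) = e.2 := by
  intro e he
  have hmem : (e.1, e.2) ∈ (PySem.Dict.mk L).items := by simpa using he
  have hnd : (PySem.Dict.mk L).keys.Nodup := by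
    simpa [PySem.Dict.keys] using hk
  rw [PySem.Dict.get?_of_mem_items (PySem.Dict.mk L) hmem hnd]
  rfl

-- ===== VERDICT (by name: the statement is the Claim_ definition above) =====
theorem build_product_graph_spec : Claim_equal_build_product_graph := by
  intro L _ hPre
  unfold Pre_build_product_graph at hPre
  simp only [Bool.and_eq_true, beq_iff_eq, List.all_eq_true] at hPre
  have hk : (L.map Prod.fst).Nodup := hPre.1 ▸ PySem.List.nodup_dedup _
  have hv : ∀ e ∈ L, e.2.Nodup := fun e he => (hPre.2 e he) ▸ PySem.List.nodup_dedup _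
  unfold Spec_build_product_graph build_product_graph build_product_graph_alt
  dsimp only
  congr 1
  rw [show PySem.Dict.keys (PySem.Dict.mk L) = L.map Prod.fst from rfl, List.foldl_map]
  apply PySem.List.foldl_congr_mem
  intro acc e he
  rw [pv_hget L hk e he]
  apply PySem.List.foldl_congr_mem
  intro acc' u _
  rw [← PySem.Dict.getD_eq_get?_getD, pv_idx_getD L u PySem.Dict.empty hv,
      PySem.Dict.getD_empty, List.nil_append]
  exact pv_inner_eq L e.1 u acc' (pv_hget L hk)
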